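-- pv_equiv track=rewrite | github.com/valenb02/primer-repo | jugando_con_secuencias.py | vocales_distintas
-- ===== SOURCE A (Python) =====
-- def pertenece(lista: list[int], e: int) -> bool:
--     for i in range(len(lista)):
--         if lista[i] == e:
--             return True
--     return False
--
-- def vocales_distintas(palabra: str) -> bool:
--     vocales : list[str] = ['a','e','i','o','u','A','E','I','O','U']
--     num_vocales_encontradas : int = 0
--     vocales_encontradas : str = ""
--     for letra in palabra:
--         if pertenece(vocales, letra) and not pertenece(vocales_encontradas, letra):
--             num_vocales_encontradas += 1
--             vocales_encontradas += letra
--     if num_vocales_encontradas >= 3: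
--         return True
--     return False
-- ===== SOURCE B (Python) =====
-- def vocales_distintas(palabra: str) -> bool:
--     return len(set(palabra) & set('aeiouAEIOU')) >= 3
-- ===== Notes on version B (the rewrite author's own statement) =====
-- stated objective: idiomatic
-- what changed: Replaces the character-by-character accumulation loop with its two linear membership scans by building set(palabra) once and intersecting it with a vowel set, then comparing its size to 3.
import Mathlib
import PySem

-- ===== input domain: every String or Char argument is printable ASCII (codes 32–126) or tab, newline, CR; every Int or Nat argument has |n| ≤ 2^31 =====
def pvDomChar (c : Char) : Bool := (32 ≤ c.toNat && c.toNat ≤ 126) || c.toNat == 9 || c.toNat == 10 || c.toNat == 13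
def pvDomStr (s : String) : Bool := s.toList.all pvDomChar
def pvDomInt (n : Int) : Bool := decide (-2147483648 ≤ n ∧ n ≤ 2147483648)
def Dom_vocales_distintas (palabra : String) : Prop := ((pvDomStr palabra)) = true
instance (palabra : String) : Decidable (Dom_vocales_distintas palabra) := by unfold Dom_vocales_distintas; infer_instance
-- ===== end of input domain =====

-- B replaces A's scan-and-append loop by set(palabra) ∩ vowel set, compared with 3 (idiomatic; same behaviour).

-- ===== PORT A =====
-- helper pertenece: linear scan with early return, transliterated as structural recursion
def pertenece : List Char → Char → Bool
  | [], _ => false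
  | x :: xs, e => if x == e then true else pertenece xs e

def vocalesA : List Char := ['a','e','i','o','u','A','E','I','O','U']

-- the for-loop of A: state (num_vocales_encontradas, vocales_encontradas)
def vdLoop : List Char → Int → List Char → Int × List Char
  | [], n, enc => (n, enc)
  | letra :: rest, n, enc =>
    if pertenece vocalesA letra && !(pertenece enc letra) then
      vdLoop rest (n + 1) (enc ++ [letra])
    else
      vdLoop rest n enc

def vocales_distintas (palabra : String) : Bool :=
  let r := vdLoop palabra.toList 0 []
  if r.1 ≥ 3 then true else false

-- ===== PORT B =====
def vocales_distintas_alt (palabra : String) : Bool :=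
  decide (PySem.Set.len (PySem.Set.inter (PySem.Set.ofList palabra.toList)
            (PySem.Set.ofList "aeiouAEIOU".toList)) ≥ 3)

-- ===== PRECONDITION & SPEC =====
def Spec_vocales_distintas (palabra : String) (out : Bool) : Prop := out = vocales_distintas_alt palabra
instance (palabra : String) (out : Bool) : Decidable (Spec_vocales_distintas palabra out) := by unfold Spec_vocales_distintas; infer_instance

-- ===== CLAIM (what is proved, stated in full; the proofs are below) =====
def Claim_equal_vocales_distintas : Prop := ∀ (palabra : String), Dom_vocales_distintas palabra → Spec_vocales_distintas palabra (vocales_distintas palabra)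

-- ===== LEMMAS AND PROOFS =====

theorem pertenece_iff (l : List Char) (e : Char) : pertenece l e = true ↔ e ∈ l := by
  induction l with
  | nil => simp [pertenece]
  | cons x xs ih =>
    by_cases h : x = e
    · subst h; simp [pertenece]
    · have hne : e ≠ x := fun he => h he.symm
      have hb : (x == e) = false := by simp [h]
      simp [pertenece, hb, ih, hne]

-- the loop's counter equals the growth of the accumulated string
theorem vdLoop_fst (l : List Char) (n : Int) (enc : List Char) :
    (vdLoop l n enc).1 = n + ((vdLoop l n enc).2.length : Int) - (enc.length : Int) := by
  induction l generalizing n enc with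
  | nil => simp [vdLoop]
  | cons c rest ih =>
    simp only [vdLoop]
    split_ifs with h
    · rw [ih]; simp; ring
    · rw [ih]

-- the accumulated string is nodup and holds exactly enc's members plus the vowels of l
theorem vdLoop_snd_mem (l : List Char) (n : Int) (enc : List Char) (y : Char) :
    y ∈ (vdLoop l n enc).2 ↔ y ∈ enc ∨ (y ∈ l ∧ y ∈ vocalesA) := by
  induction l generalizing n enc with
  | nil => simp [vdLoop]
  | cons c rest ih =>
    simp only [vdLoop, List.mem_cons]
    split_ifs with h
    · rw [ih]
      simp only [Bool.and_eq_true, pertenece_iff] at h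
      have hc : c ∈ vocalesA := h.1
      by_cases hyc : y = c
      · subst hyc; simp [hc]
      · simp [hyc]
    · rw [ih]
      have hce : c ∈ vocalesA → c ∈ enc := by
        intro hv
        rw [← pertenece_iff] at hv ⊢
        cases hb : pertenece enc c with
        | true => rfl
        | false => exact absurd (by simp [hv, hb]) h
      by_cases hyc : y = c
      · subst hyc
        constructor
        · rintro (he | ⟨hl, hv⟩)
          · exact Or.inl he
          · exact Or.inr ⟨Or.inr hl, hv⟩
        · rintro (he | ⟨_, hv⟩)
          · exact Or.inl he
          · exact Or.inl (hce hv)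
      · simp [hyc]

theorem vdLoop_snd_nodup (l : List Char) (n : Int) (enc : List Char) (h : enc.Nodup) :
    (vdLoop l n enc).2.Nodup := by
  induction l generalizing n enc with
  | nil => simpa [vdLoop]
  | cons c rest ih =>
    simp only [vdLoop]
    split_ifs with hc
    · apply ih
      have hcn : c ∉ enc := by
        intro hm
        simp only [Bool.and_eq_true, Bool.not_eq_true'] at hc
        rw [(pertenece_iff enc c).mpr hm] at hc
        simp at hc
      rw [List.nodup_append]
      refine ⟨h, List.nodup_singleton c, ?_⟩
      intro a ha b hb
      rw [List.mem_singleton] at hb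
      subst hb
      exact fun hac => hcn (hac ▸ ha)
    · exact ih n enc h

theorem voc_eq : "aeiouAEIOU".toList = vocalesA := by decide

-- B's intersection: nodup with the same members
theorem inter_mem (l : List Char) (y : Char) :
    y ∈ PySem.Set.inter (PySem.Set.ofList l) (PySem.Set.ofList "aeiouAEIOU".toList) ↔
      y ∈ l ∧ y ∈ vocalesA := by
  rw [PySem.Set.mem_inter, PySem.Set.mem_ofList, PySem.Set.mem_ofList, voc_eq]

theorem main_eq (l : List Char) :
    (vdLoop l 0 []).1 =
      ((PySem.Set.inter (PySem.Set.ofList l) (PySem.Set.ofList "aeiouAEIOU".toList)).length : Int) := by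
  have hfst := vdLoop_fst l 0 []
  simp only [List.length_nil, sub_zero, zero_add, Nat.cast_zero] at hfst
  rw [hfst]
  congr 1
  have hnd1 : (vdLoop l 0 ([] : List Char)).2.Nodup := vdLoop_snd_nodup l 0 [] List.nodup_nil
  have hnd2 : (PySem.Set.inter (PySem.Set.ofList l) (PySem.Set.ofList "aeiouAEIOU".toList)).Nodup :=
    PySem.Set.nodup_inter _ _ (PySem.Set.nodup_ofList _)
  have hperm : (vdLoop l 0 ([] : List Char)).2.Perm
      (PySem.Set.inter (PySem.Set.ofList l) (PySem.Set.ofList "aeiouAEIOU".toList)) := by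
    rw [List.perm_ext_iff_of_nodup hnd1 hnd2]
    intro y
    rw [vdLoop_snd_mem, inter_mem]
    simp
  exact hperm.length_eq

-- ===== VERDICT (by name: the statement is the Claim_ definition above) =====
theorem vocales_distintas_spec : Claim_equal_vocales_distintas := by
  intro palabra _
  unfold Spec_vocales_distintas vocales_distintas vocales_distintas_alt
  simp only [PySem.Set.len, main_eq]
  split_ifs with h
  · rw [eq_comm, decide_eq_true_iff]
    exact_mod_cast h
  · rw [eq_comm, decide_eq_false_iff_not]
    intro hc
    exact h (by exact_mod_cast hc)
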